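-- pv_equiv track=rewrite | github.com/hksawczuk/grahamtools | examples/kn_fiber_compute.py | _star_info
-- ===== SOURCE A (Python) =====
-- from collections import defaultdict
--
-- def _star_info(
--     base_edges: list[tuple[int, int]],
-- ) -> tuple[int, int] | None:
--     """If *base_edges* form a star K_{1,r}, return (r, center). Else None."""
--     if not base_edges:
--         return None
--
--     deg: dict[int, int] = defaultdict(int)
--     for u, v in base_edges:
--         deg[u] += 1
--         deg[v] += 1
--
--     ne = len(base_edges)
--     for vertex, d in deg.items():
--         if d == ne and all(dd == 1 for vv, dd in deg.items() if vv != vertex):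
--             return (ne, vertex)
--     return None
-- ===== SOURCE B (Python) =====
-- from collections import Counter
--
--
-- def _star_info(
--     base_edges: list[tuple[int, int]],
-- ) -> tuple[int, int] | None:
--     """If *base_edges* form a star K_{1,r}, return (r, center). Else None."""
--     if not base_edges:
--         return None
--
--     ne = len(base_edges)
--     deg = Counter(v for edge in base_edges for v in edge)
--
--     # A star's degree multiset is exactly ne leaves of degree 1 plus one
--     # center of degree ne: check it with one sort instead of a scan per vertex.
--     if sorted(deg.values()) != [1] * ne + [ne]:
--         return None
--     for vertex, d in deg.items():
--         if d == ne:
--             return (ne, vertex)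
-- ===== Notes on version B (the rewrite author's own statement) =====
-- stated objective: alternative
-- what changed: A tests each vertex with an inner scan over the whole degree dict ('all other degrees == 1'); B checks the degree multiset once against the star signature sorted(deg.values()) == [1]*ne + [ne] and then takes the first vertex of degree ne, so the quadratic per-candidate rescans are replaced by one sort.
import Mathlib
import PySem

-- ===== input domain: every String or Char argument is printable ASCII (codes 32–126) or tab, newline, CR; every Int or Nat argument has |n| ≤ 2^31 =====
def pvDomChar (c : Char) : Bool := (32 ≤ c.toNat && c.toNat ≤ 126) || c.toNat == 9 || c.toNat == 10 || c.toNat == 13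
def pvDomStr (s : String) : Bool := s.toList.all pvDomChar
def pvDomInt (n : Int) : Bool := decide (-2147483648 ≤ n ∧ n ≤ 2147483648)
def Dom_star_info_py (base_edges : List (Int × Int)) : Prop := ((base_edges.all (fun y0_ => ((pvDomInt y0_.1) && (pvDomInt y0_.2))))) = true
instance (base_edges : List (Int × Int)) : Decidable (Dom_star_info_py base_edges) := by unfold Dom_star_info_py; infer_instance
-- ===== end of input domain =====

-- B replaces A's per-vertex scan of the degree dict (inner 'all' pass for every candidate)
-- by a single sorted-degree-signature check; same exact behaviour (objective: alternative).

-- ===== PORT A =====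
-- literal port of _star_info: defaultdict degree count over the edges, then for each
-- vertex test 'deg == ne and all other degrees == 1' by an inner scan; first hit returned
def star_info_py (base_edges : List (Int × Int)) : Option (Int × Int) :=
  if base_edges = [] then none
  else
    let deg : PySem.Dict Int Int :=
      base_edges.foldl (fun d uv => (d.modify uv.1 0 (· + 1)).modify uv.2 0 (· + 1))
        PySem.Dict.empty
    let ne : Int := base_edges.length
    (deg.items.find? (fun vd =>
        vd.2 == ne && deg.items.all (fun p => p.1 == vd.1 || p.2 == 1))).map
      (fun vd => (ne, vd.1))

-- ===== PORT B =====
-- literal port of Source B: Counter over the flattened endpoints, sorted-degree-values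
-- signature check, then the first vertex of degree ne
def star_info_py_alt (base_edges : List (Int × Int)) : Option (Int × Int) :=
  if base_edges = [] then none
  else
    let ne : Int := base_edges.length
    let deg : PySem.Dict Int Int :=
      PySem.Dict.counter (base_edges.flatMap (fun e => [e.1, e.2]))
    if PySem.List.sorted deg.values (fun x => x) false
        = List.replicate base_edges.length 1 ++ [ne] then
      (deg.items.find? (fun p => p.2 == ne)).map (fun p => (ne, p.1))
    else none

-- ===== PRECONDITION & SPEC =====
def Spec_star_info_py (base_edges : List (Int × Int)) (out : Option (Int × Int)) : Prop := out = star_info_py_alt base_edges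
instance (base_edges : List (Int × Int)) (out : Option (Int × Int)) : Decidable (Spec_star_info_py base_edges out) := by unfold Spec_star_info_py; infer_instance

-- ===== CLAIM (what is proved, stated in full; the proofs are below) =====
def Claim_equal_star_info_py : Prop := ∀ (base_edges : List (Int × Int)), Dom_star_info_py base_edges → Spec_star_info_py base_edges (star_info_py base_edges)

-- ===== LEMMAS AND PROOFS =====

-- find? of pointwise-equal predicates
theorem pvFindCongr {α : Type} (l : List α) (p q : α → Bool) (h : ∀ x ∈ l, p x = q x) :
    l.find? p = l.find? q := by
  induction l with
  | nil => rfl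
  | cons x t ih =>
    simp only [List.find?_cons, h x (by simp)]
    cases hq : q x with
    | true => rfl
    | false => exact ih (fun y hy => h y (by simp [hy]))

-- two distinct members of a nodup list satisfying p force countP p ≥ 2
theorem pvTwoLeCountP (l : List (Int × Int)) (hn : l.Nodup) (a b : Int × Int)
    (ha : a ∈ l) (hb : b ∈ l) (hab : a ≠ b) (p : Int × Int → Bool)
    (hpa : p a) (hpb : p b) : 2 ≤ l.countP p := by
  have hf : (l.filter p).Nodup := hn.filter p
  have hsub : ({a, b} : Finset (Int × Int)) ⊆ (l.filter p).toFinset := by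
    intro x hx
    simp only [Finset.mem_insert, Finset.mem_singleton] at hx
    rcases hx with rfl | rfl
    · exact List.mem_toFinset.2 (List.mem_filter.2 ⟨ha, hpa⟩)
    · exact List.mem_toFinset.2 (List.mem_filter.2 ⟨hb, hpb⟩)
  have hc := Finset.card_le_card hsub
  rw [Finset.card_pair hab, List.toFinset_card_of_nodup hf] at hc
  rw [List.countP_eq_length_filter]
  exact hc

-- the heart: on a nodup-keyed association list of degrees summing to 2·n, A's
-- first-vertex-passing-the-degree-test scan equals B's sorted-signature gate
theorem pvMain (L : List (Int × Int)) (n : Nat) (h1 : 1 ≤ n)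
    (hkeys : (L.map Prod.fst).Nodup)
    (hsum : (L.map Prod.snd).sum = 2 * (n : Int)) :
    (L.find? (fun vd => vd.2 == (n : Int) && L.all (fun p => p.1 == vd.1 || p.2 == 1))).map
        (fun vd => ((n : Int), vd.1))
      = if PySem.List.sorted (L.map Prod.snd) (fun x => x) false
            = List.replicate n 1 ++ [(n : Int)] then
          (L.find? (fun p => p.2 == (n : Int))).map (fun p => ((n : Int), p.1))
        else none := by
  have hnd : L.Nodup := hkeys.of_map
  have hinj := List.inj_on_of_nodup_map hkeys
  split_ifs with hs
  · -- signature holds: the two find? predicates agree on members of L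
    have hperm : (L.map Prod.snd).Perm (List.replicate n 1 ++ [(n : Int)]) := by
      rw [← hs]; exact (PySem.List.sorted_perm (L.map Prod.snd) (fun x => x) false).symm
    congr 1
    apply pvFindCongr
    intro x hx
    cases hne : (x.2 == (n : Int)) with
    | false => simp
    | true =>
      simp only [Bool.true_and]
      have hx2 : x.2 = (n : Int) := by exact_mod_cast of_decide_eq_true hne
      -- the inner all-scan succeeds
      have : L.all (fun p => p.1 == x.1 || p.2 == 1) = true := by
        rw [List.all_eq_true]
        intro p hp
        by_cases hk : p.1 = x.1
        · simp [hk]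
        · have hmem : p.2 ∈ List.replicate n 1 ++ [(n : Int)] :=
            hperm.mem_iff.1 (List.mem_map.2 ⟨p, hp, rfl⟩)
          have hp2 : p.2 = 1 ∨ p.2 = (n : Int) := by
            rcases List.mem_append.1 hmem with h | h
            · exact Or.inl (List.eq_of_mem_replicate h)
            · exact Or.inr (by simpa using h)
          rcases hp2 with hp2 | hp2
          · simp [hp2]
          · -- p.2 = n : impossible unless n = 1 (and then p.2 = 1 anyway)
            rcases eq_or_lt_of_le h1 with hone | hgt
            · simp [hp2, ← hone]
            · exfalso
              have hne1 : (n : Int) ≠ 1 := by exact_mod_cast (by omega : n ≠ 1)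
              have hcnt1 : (L.map Prod.snd).count ((n : Int)) = 1 := by
                rw [hperm.count_eq, List.count_append, List.count_replicate]
                simp [if_neg (fun h : (1 : Int) = (n : Int) => hne1 h.symm)]
              have hxp : x ≠ p := fun h => hk (congrArg Prod.fst h).symm
              have h2le : 2 ≤ L.countP (fun y => y.2 == (n : Int)) :=
                pvTwoLeCountP L hnd x p hx hp hxp _ (by simp [hx2]) (by simp [hp2])
              have : (L.map Prod.snd).count ((n : Int)) = L.countP (fun y => y.2 == (n : Int)) := by
                simp [List.count, List.countP_map, Function.comp_def]
              omega
      simp [this]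
  · -- signature fails: A's scan finds nothing
    rw [List.find?_eq_none.2, Option.map_none]
    intro x hx hpred
    apply hs
    simp only [Bool.and_eq_true, List.all_eq_true, Bool.or_eq_true, beq_iff_eq] at hpred
    obtain ⟨hx2, hall⟩ := hpred
    -- every other entry has degree 1
    have herase : ∀ y ∈ L.erase x, y.2 = 1 := by
      intro y hy
      have hyL : y ∈ L := List.mem_of_mem_erase hy
      have hyx : y ≠ x := ((List.Nodup.mem_erase_iff hnd).1 hy).1
      rcases hall y hyL with h | h
      · exact absurd (hinj hyL hx h) hyx
      · exact h
    have hrep : (L.erase x).map Prod.snd = List.replicate (L.erase x).length 1 := by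
      have := List.eq_replicate_of_mem (l := (L.erase x).map Prod.snd) (a := (1 : Int))
        (by intro b hb; obtain ⟨y, hy, rfl⟩ := List.mem_map.1 hb; exact herase y hy)
      simpa using this
    have hpermL : L.Perm (x :: L.erase x) := List.perm_cons_erase hx
    have hvals : (L.map Prod.snd).Perm ((n : Int) :: List.replicate (L.erase x).length 1) := by
      have := hpermL.map Prod.snd
      rw [List.map_cons, hrep, hx2] at this
      exact this
    -- the degree sum pins the leaf count to n
    have hlen : (L.erase x).length = n := by
      have hsum2 := hvals.sum_eq
      rw [hsum] at hsum2
      simp [List.sum_replicate] at hsum2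
      omega
    -- hence the sorted degree list is exactly the signature
    apply PySem.List.sorted_id_eq_of_perm_of_pairwise
    · have : (List.replicate n 1 ++ [(n : Int)]).Perm ((n : Int) :: List.replicate n 1) :=
        (List.perm_append_comm).trans (by simp)
      exact this.trans (hlen ▸ hvals.symm)
    · rw [List.pairwise_append]
      refine ⟨List.pairwise_replicate.2 (Or.inr le_rfl), List.pairwise_singleton _ _, ?_⟩
      intro a ha b hb
      rw [List.eq_of_mem_replicate ha]
      simp only [List.mem_singleton] at hb
      rw [hb]; exact_mod_cast h1

-- A's per-edge double increment builds Counter(flattened endpoints)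
theorem pvFoldTwoModify (es : List (Int × Int)) (d0 : PySem.Dict Int Int) :
    es.foldl (fun d uv => (d.modify uv.1 0 (· + 1)).modify uv.2 0 (· + 1)) d0
      = (es.flatMap (fun e => [e.1, e.2])).foldl (fun d x => d.modify x 0 (· + 1)) d0 := by
  induction es generalizing d0 with
  | nil => rfl
  | cons e t ih => simp [List.flatMap_cons, ih]

theorem pvValuesItems (d : PySem.Dict Int Int) : d.values = d.items.map Prod.snd := by
  simp [PySem.Dict.values]

theorem pvKeysCounter (l : List Int) :
    ((PySem.Dict.counter l).items.map Prod.fst) = PySem.Set.ofList l := by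
  simp [PySem.Dict.items_counter, List.map_map, Function.comp_def]

theorem pvSumCounter (l : List Int) :
    ((PySem.Dict.counter l).items.map Prod.snd).sum = (l.length : Int) := by
  have hperm : (PySem.Set.ofList l).Perm l.dedup := by
    rw [List.perm_ext_iff_of_nodup (PySem.Set.nodup_ofList l) l.nodup_dedup]
    intro a; simp [PySem.Set.mem_ofList]
  have h1 : ((PySem.Set.ofList l).map (fun k => l.count k)).sum = l.length := by
    rw [(hperm.map (fun k => l.count k)).sum_eq]
    exact List.sum_map_count_dedup_eq_length l
  have h2 : ((PySem.Dict.counter l).items.map Prod.snd)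
      = ((PySem.Set.ofList l).map (fun k => l.count k)).map Nat.cast := by
    simp [PySem.Dict.items_counter, List.map_map, Function.comp_def]
  rw [h2, ← Nat.cast_list_sum, h1]

theorem pvFlatLen (es : List (Int × Int)) :
    (es.flatMap (fun e => [e.1, e.2])).length = 2 * es.length := by
  induction es with
  | nil => rfl
  | cons e t ih => simp [List.flatMap_cons, ih]; omega

-- ===== VERDICT (by name: the statement is the Claim_ definition above) =====
theorem star_info_py_spec : Claim_equal_star_info_py := by
  intro es _
  unfold Spec_star_info_py star_info_py star_info_py_alt
  by_cases h : es = []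
  · simp [h]
  · simp only [if_neg h]
    rw [pvFoldTwoModify es PySem.Dict.empty, ← PySem.Dict.counter_eq_foldl, pvValuesItems]
    exact pvMain ((PySem.Dict.counter (es.flatMap (fun e => [e.1, e.2]))).items) es.length
      (List.length_pos_of_ne_nil h)
      (pvKeysCounter _ ▸ PySem.Set.nodup_ofList _)
      (by rw [pvSumCounter, pvFlatLen]; push_cast; ring)
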